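-- pv_equiv track=rewrite | github.com/cannero/neomacs | scripts/transform_tagged.py | _split_code_comments
-- ===== SOURCE A (Python) =====
-- def _split_code_comments(text: str) -> list:
--     """Split text into (segment, is_comment) pairs.
--
--     Handles /* ... */ block comments and // line comments.
--     """
--     segments = []
--     i = 0
--     current = []
--     while i < len(text):
--         if text[i] == '/' and i + 1 < len(text) and text[i + 1] == '*':
--             # Start of block comment
--             if current:
--                 segments.append((''.join(current), False))
--                 current = []
--             comment = ['/*']
--             i += 2
--             while i < len(text):
--                 if text[i] == '*' and i + 1 < len(text) and text[i + 1] == '/':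
--                     comment.append('*/')
--                     i += 2
--                     break
--                 comment.append(text[i])
--                 i += 1
--             segments.append((''.join(comment), True))
--         elif text[i] == '/' and i + 1 < len(text) and text[i + 1] == '/':
--             # Start of line comment - rest of line is comment
--             if current:
--                 segments.append((''.join(current), False))
--                 current = []
--             comment = []
--             while i < len(text) and text[i] != '\n':
--                 comment.append(text[i])
--                 i += 1
--             segments.append((''.join(comment), True))
--         elif text[i] == '"':
--             # String literal - include in code segment
--             current.append(text[i])
--             i += 1
--             while i < len(text) and text[i] != '"':
--                 if text[i] == '\\':
--                     current.append(text[i])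
--                     i += 1
--                     if i < len(text):
--                         current.append(text[i])
--                         i += 1
--                 else:
--                     current.append(text[i])
--                     i += 1
--             if i < len(text):
--                 current.append(text[i])
--                 i += 1
--         else:
--             current.append(text[i])
--             i += 1
--     if current:
--         segments.append((''.join(current), False))
--     return segments
-- ===== SOURCE B (Python) =====
-- # B: two-phase re-implementation: tokenize with str.find jumps and slices
-- # (whole comments, whole string literals, whole code chunks between '/' and '"'),
-- # then merge adjacent code tokens into segments in a second pass.
--
-- def _string_end(text, i):
--     n = len(text)
--     while i < n:
--         c = text[i]
--         if c == '"':
--             return i + 1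
--         i += 2 if c == '\\' else 1
--     return n
--
--
-- def _tokens(text):
--     toks = []
--     i, n = 0, len(text)
--     while i < n:
--         two = text[i:i + 2]
--         if two == '/*':
--             e = text.find('*/', i + 2)
--             end = n if e == -1 else e + 2
--             toks.append((text[i:end], True))
--             i = end
--         elif two == '//':
--             e = text.find('\n', i + 2)
--             end = n if e == -1 else e
--             toks.append((text[i:end], True))
--             i = end
--         elif text[i] == '"':
--             end = _string_end(text, i + 1)
--             toks.append((text[i:end], False))
--             i = end
--         else:
--             nxt = n
--             for ch in ('/', '"'):
--                 p = text.find(ch, i + 1)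
--                 if p != -1 and p < nxt:
--                     nxt = p
--             toks.append((text[i:nxt], False))
--             i = nxt
--     return toks
--
--
-- def _split_code_comments(text: str) -> list:
--     segments = []
--     buf = []
--     for tok, is_comment in _tokens(text):
--         if is_comment:
--             if buf:
--                 segments.append((''.join(buf), False))
--                 buf = []
--             segments.append((tok, True))
--         else:
--             buf.append(tok)
--     if buf:
--         segments.append((''.join(buf), False))
--     return segments
-- ===== Notes on version B (the rewrite author's own statement) =====
-- stated objective: faster
-- what changed: A scans character by character in one big accumulator loop; B is two-phase: a tokenizer that jumps with str.find and slices over whole comments, string literals and code chunks, then a separate pass merging adjacent code tokens into segments.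
import Mathlib
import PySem

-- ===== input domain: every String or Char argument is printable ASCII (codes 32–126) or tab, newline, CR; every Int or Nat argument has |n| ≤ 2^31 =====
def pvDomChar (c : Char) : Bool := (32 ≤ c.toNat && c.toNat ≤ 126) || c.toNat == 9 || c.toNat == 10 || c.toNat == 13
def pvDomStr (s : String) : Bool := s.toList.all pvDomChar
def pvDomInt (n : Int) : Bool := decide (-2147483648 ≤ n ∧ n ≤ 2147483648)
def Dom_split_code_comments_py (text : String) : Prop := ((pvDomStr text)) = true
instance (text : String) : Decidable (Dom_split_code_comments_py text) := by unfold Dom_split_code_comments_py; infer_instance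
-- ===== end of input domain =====

-- B re-implements the splitter as tokenize-with-find-jumps + a second merge pass; measured faster by a constant factor (C-level find/slices instead of per-character Python work).

-- ===== PORT A =====
-- A's inner while loops, transliterated as recursion over the remaining characters;
-- `acc`/`cur` is the Python list of appended characters, in order.

-- inner `while` of the block-comment branch (text[i]=='*' and i+1<len and text[i+1]=='/')
def aBlockLoop : List Char → List Char → (List Char × List Char)
  | [], acc => (acc, [])
  | '*' :: '/' :: rest, acc => (acc ++ ['*', '/'], rest)
  | c :: rest, acc => aBlockLoop rest (acc ++ [c])

-- inner `while` of the line-comment branch (while i < len and text[i] != '\n')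
def aLineLoop : List Char → List Char → (List Char × List Char)
  | [], acc => (acc, [])
  | c :: rest, acc => if c = '\n' then (acc, c :: rest) else aLineLoop rest (acc ++ [c])

-- inner `while` of the string-literal branch, including the trailing `if i < len` quote append
def aStrLoop : List Char → List Char → (List Char × List Char)
  | [], cur => (cur, [])
  | c :: rest, cur =>
    if c = '"' then (cur ++ [c], rest)
    else if c = '\\' then
      match rest with
      | [] => (cur ++ [c], [])
      | d :: rest' => aStrLoop rest' (cur ++ [c, d])
    else aStrLoop rest (cur ++ [c])

-- termination facts for the outer loop: each inner loop never returns more than it was given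
theorem aBlockLoop_snd_le (cs acc : List Char) : (aBlockLoop cs acc).2.length ≤ cs.length := by
  fun_induction aBlockLoop cs acc <;> simp_all
  all_goals omega

theorem aLineLoop_snd_le (cs acc : List Char) : (aLineLoop cs acc).2.length ≤ cs.length := by
  fun_induction aLineLoop cs acc <;> simp_all
  all_goals omega

theorem aStrLoop_snd_le (cs cur : List Char) : (aStrLoop cs cur).2.length ≤ cs.length := by
  fun_induction aStrLoop cs cur <;> simp_all
  all_goals omega

-- the outer `while i < len(text)` of A; `cur` = current, `segs` = segments.
-- In the line-comment branch A's inner while provably first consumes the two '/'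
-- characters (text[i]=='/'≠'\n', text[i+1]=='/'≠'\n'); that first double step is
-- folded here so the recursion is on the strict suffix.
def aMain (cs : List Char) (cur : List Char) (segs : List (String × Bool)) : List (String × Bool) :=
  match cs with
  | [] => if cur = [] then segs else segs ++ [(String.ofList cur, false)]
  | '/' :: '*' :: rest =>
    let segs' := if cur = [] then segs else segs ++ [(String.ofList cur, false)]
    let r := aBlockLoop rest ['/', '*']
    aMain r.2 [] (segs' ++ [(String.ofList r.1, true)])
  | '/' :: '/' :: rest =>
    let segs' := if cur = [] then segs else segs ++ [(String.ofList cur, false)]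
    let r := aLineLoop rest ['/', '/']
    aMain r.2 [] (segs' ++ [(String.ofList r.1, true)])
  | '"' :: rest =>
    let r := aStrLoop rest (cur ++ ['"'])
    aMain r.2 r.1 segs
  | c :: rest => aMain rest (cur ++ [c]) segs
termination_by cs.length
decreasing_by
  · have := aBlockLoop_snd_le rest ['/', '*']; simp; omega
  · have := aLineLoop_snd_le rest ['/', '/']; simp; omega
  · have := aStrLoop_snd_le rest (cur ++ ['"']); simp; omega
  · simp

def split_code_comments_py (text : String) : List (String × Bool) :=
  aMain text.toList [] []

-- ===== PORT B =====
-- Source B's _string_end, relative to the position after the opening quote: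
-- number of characters the literal's body (incl. closing quote) occupies.
def bStrEnd : List Char → Nat
  | [] => 0
  | '"' :: _ => 1
  | '\\' :: [] => 1          -- i += 2 past the end; the slice clamps, so 1 char is consumed
  | '\\' :: _ :: rest => 2 + bStrEnd rest
  | _ :: rest => 1 + bStrEnd rest

-- exact port of text.find(p, k) for a two-character pattern p, relative to k:
-- first index where the pattern starts, none = -1
def findSub2 (a b : Char) : List Char → Option Nat
  | x :: y :: rest => if x = a ∧ y = b then some 0 else (findSub2 a b (y :: rest)).map (· + 1)
  | _ => none
termination_by cs => cs.length

-- Source B's _tokens: the `while i < n` loop over absolute indices, transliterated as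
-- recursion on the suffix text[i:]; all finds/slices in Source B are relative to i.
-- The `for ch in ('/', '"')` min-of-finds is exactly the first index of '/' or '"'.
def bTokens (cs : List Char) : List (List Char × Bool) :=
  match cs with
  | [] => []
  | '/' :: '*' :: rest =>
    match findSub2 '*' '/' rest with
    | none => [('/' :: '*' :: rest, true)]
    | some e => (('/' :: '*' :: rest).take (e + 4), true) :: bTokens (('/' :: '*' :: rest).drop (e + 4))
  | '/' :: '/' :: rest =>
    match rest.findIdx? (· = '\n') with
    | none => [('/' :: '/' :: rest, true)]
    | some e => (('/' :: '/' :: rest).take (e + 2), true) :: bTokens (('/' :: '/' :: rest).drop (e + 2))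
  | '"' :: rest =>
    let k := bStrEnd rest
    (('"' :: rest).take (k + 1), false) :: bTokens (('"' :: rest).drop (k + 1))
  | c :: rest =>
    match rest.findIdx? (fun d => d = '/' ∨ d = '"') with
    | none => [(c :: rest, false)]
    | some j => ((c :: rest).take (j + 1), false) :: bTokens ((c :: rest).drop (j + 1))
termination_by cs.length
decreasing_by all_goals first | (simp; omega) | simp

-- Source B's merge loop: buf collects code tokens, flushed before each comment and at the end
def bMerge : List (List Char × Bool) → List Char → List (String × Bool)
  | [], buf => if buf = [] then [] else [(String.ofList buf, false)]
  | (tok, true) :: rest, buf =>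
    (if buf = [] then [] else [(String.ofList buf, false)]) ++ (String.ofList tok, true) :: bMerge rest []
  | (tok, false) :: rest, buf => bMerge rest (buf ++ tok)

def split_code_comments_py_alt (text : String) : List (String × Bool) :=
  bMerge (bTokens text.toList) []

-- ===== PRECONDITION & SPEC =====
def Spec_split_code_comments_py (text : String) (out : List (String × Bool)) : Prop := out = split_code_comments_py_alt text
instance (text : String) (out : List (String × Bool)) : Decidable (Spec_split_code_comments_py text out) := by unfold Spec_split_code_comments_py; infer_instance

-- ===== CLAIM (what is proved, stated in full; the proofs are below) =====
def Claim_equal_split_code_comments_py : Prop := ∀ (text : String), Dom_split_code_comments_py text → Spec_split_code_comments_py text (split_code_comments_py text)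

-- ===== LEMMAS AND PROOFS =====

-- accumulator factoring for the inner loops
theorem aBlockLoop_append (cs a b : List Char) :
    aBlockLoop cs (a ++ b) = (a ++ (aBlockLoop cs b).1, (aBlockLoop cs b).2) := by
  fun_induction aBlockLoop cs b <;> simp_all [aBlockLoop]

theorem aLineLoop_append (cs a b : List Char) :
    aLineLoop cs (a ++ b) = (a ++ (aLineLoop cs b).1, (aLineLoop cs b).2) := by
  fun_induction aLineLoop cs b <;> simp_all [aLineLoop]

theorem aStrLoop_append (cs a b : List Char) :
    aStrLoop cs (a ++ b) = (a ++ (aStrLoop cs b).1, (aStrLoop cs b).2) := by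
  fun_induction aStrLoop cs b <;> (try simp [aStrLoop, *]) <;> (rw [aStrLoop.eq_def]; simp [*])

-- in the fallback arm of aStrLoop/bStrEnd the head is neither '"' nor '\\'

-- each inner loop of A computes exactly B's find/slice decomposition
theorem aBlockLoop_eq (cs : List Char) :
    aBlockLoop cs [] = (match findSub2 '*' '/' cs with
      | none => (cs, [])
      | some e => (cs.take (e + 2), cs.drop (e + 2))) := by
  fun_induction findSub2 '*' '/' cs with
  | case1 x y rest h =>
    obtain ⟨hx, hy⟩ := h; subst hx; subst hy
    simp [aBlockLoop]
  | case2 x y rest h ih =>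
    have step : aBlockLoop (x :: y :: rest) [] = ([x] ++ (aBlockLoop (y :: rest) []).1, (aBlockLoop (y :: rest) []).2) := by
      conv_lhs => rw [aBlockLoop.eq_def]
      split
      · rename_i heq; exact absurd heq (by simp)
      · rename_i r h2
        injection h2 with hx hr
        injection hr with hy hr2
        exact absurd ⟨hx, hy⟩ h
      · rename_i c r heq
        injection heq with h1 h2; subst h1; subst h2
        simpa using aBlockLoop_append (y :: rest) [x] []
    rw [step, ih]
    cases hf : findSub2 '*' '/' (y :: rest) <;> simp [List.take_succ_cons, List.drop_succ_cons]
  | case3 cs h =>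
    match cs with
    | [] => simp [aBlockLoop]
    | [x] => simp [aBlockLoop]
    | x :: y :: rest => exact absurd rfl (h x y rest)

theorem aLineLoop_eq (cs : List Char) :
    aLineLoop cs [] = (match cs.findIdx? (· = '\n') with
      | none => (cs, [])
      | some e => (cs.take e, cs.drop e)) := by
  induction cs with
  | nil => simp [aLineLoop]
  | cons c rest ih =>
    by_cases h : c = '\n'
    · subst h; simp [aLineLoop, List.findIdx?_cons]
    · have h2 : aLineLoop (c :: rest) [] = ([c] ++ (aLineLoop rest []).1, (aLineLoop rest []).2) := by
        rw [aLineLoop]; simp [h]; simpa using aLineLoop_append rest [c] []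
      rw [h2, ih, List.findIdx?_cons]
      cases hf : rest.findIdx? (· = '\n') <;> simp [h]

theorem aStrLoop_eq (cs : List Char) :
    aStrLoop cs [] = (cs.take (bStrEnd cs), cs.drop (bStrEnd cs)) := by
  fun_induction bStrEnd cs with
  | case1 => simp [aStrLoop]
  | case2 rest => rw [aStrLoop.eq_def]; simp
  | case3 => rw [aStrLoop.eq_def]; simp
  | case4 d rest ih =>
    rw [aStrLoop.eq_def]
    simp only [reduceIte, Char.reduceEq, List.nil_append]
    have := aStrLoop_append rest ['\\', d] []
    simp only [List.append_nil] at this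
    rw [this, ih]
    simp [List.take_cons, List.drop_cons]
  | case5 c rest hq hb ih ih2 =>
    have hc : ¬ c = '\\' := by
      intro h; cases rest with
      | nil => exact hb h rfl
      | cons x xs => exact ih x xs h rfl
    rw [aStrLoop.eq_def]
    simp only [List.nil_append, if_neg hq, if_neg hc]
    have := aStrLoop_append rest [c] []
    simp only [List.append_nil] at this
    rw [this, ih2]
    rw [show 1 + bStrEnd rest = (bStrEnd rest) + 1 by omega]
    simp

-- unfolding bTokens on a head that starts none of the three tokens
theorem bTokens_cons_code (c : Char) (rest : List Char)
    (h1 : ∀ r, c = '/' → rest = '*' :: r → False)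
    (h2 : ∀ r, c = '/' → rest = '/' :: r → False)
    (h3 : c = '"' → False) :
    bTokens (c :: rest) = (match rest.findIdx? (fun d => d = '/' ∨ d = '"') with
      | none => [(c :: rest, false)]
      | some j => ((c :: rest).take (j + 1), false) :: bTokens ((c :: rest).drop (j + 1))) := by
  rw [bTokens.eq_def]
  split
  · rename_i heq; exact absurd heq (by simp)
  · rename_i r heq
    injection heq with hc hr
    exact (h1 r hc hr).elim
  · rename_i r heq
    injection heq with hc hr
    exact (h2 r hc hr).elim
  · rename_i r heq
    injection heq with hc hr
    exact (h3 hc).elim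
  · rename_i c' r heq
    injection heq with hc hr
    subst hc; subst hr
    rfl

-- a suffix with no '/' and no '"' merges wholly into the code buffer
theorem bMerge_bTokens_none (cs buf : List Char)
    (h : cs.findIdx? (fun d => d = '/' ∨ d = '"') = none) :
    bMerge (bTokens cs) buf = bMerge [] (buf ++ cs) := by
  cases cs with
  | nil => simp [bTokens]
  | cons d rest =>
    rw [List.findIdx?_cons] at h
    by_cases hd : (d = '/' ∨ d = '"')
    · simp [hd] at h
    · push Not at hd
      rw [bTokens_cons_code d rest (fun r hc _ => hd.1 hc) (fun r hc _ => hd.1 hc) (fun hc => hd.2 hc)]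
      rw [if_neg (by simp [hd.1, hd.2])] at h
      rw [Option.map_eq_none_iff.mp h]
      simp [bMerge]

-- a code chunk up to the first '/' or '"' of the tail merges into the buffer
theorem bMerge_bTokens_some (cs buf : List Char) (j : Nat)
    (h : cs.findIdx? (fun d => d = '/' ∨ d = '"') = some j) :
    bMerge (bTokens cs) buf = bMerge (bTokens (cs.drop j)) (buf ++ cs.take j) := by
  cases cs with
  | nil => simp [List.findIdx?_nil] at h
  | cons d rest =>
    by_cases hd : (d = '/' ∨ d = '"')
    · have hj : j = 0 := by
        rw [List.findIdx?_cons] at h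
        simp [hd] at h
        omega
      subst hj
      simp
    · push Not at hd
      rw [List.findIdx?_cons, if_neg (by simp [hd.1, hd.2])] at h
      obtain ⟨j', hj', rfl⟩ := Option.map_eq_some_iff.mp h
      rw [bTokens_cons_code d rest (fun r hc _ => hd.1 hc) (fun r hc _ => hd.1 hc) (fun hc => hd.2 hc)]
      rw [hj']
      simp [bMerge]

-- main correspondence
theorem aMain_eq (cs cur : List Char) (segs : List (String × Bool)) :
    aMain cs cur segs = segs ++ bMerge (bTokens cs) cur := by
  fun_induction aMain cs cur segs with
  | case1 segs => simp [bTokens, bMerge]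
  | case2 cur segs h => simp [bTokens, bMerge, h]
  | case3 cur segs rest segs' r ih =>
    rw [ih]
    have hr : r = (['/', '*'] ++ (aBlockLoop rest []).1, (aBlockLoop rest []).2) := by
      show aBlockLoop rest ['/', '*'] = _
      simpa using aBlockLoop_append rest ['/', '*'] []
    rw [aBlockLoop_eq rest] at hr
    have hb : bTokens ('/' :: '*' :: rest) = (match findSub2 '*' '/' rest with
      | none => [('/' :: '*' :: rest, true)]
      | some e => (('/' :: '*' :: rest).take (e + 4), true) :: bTokens (('/' :: '*' :: rest).drop (e + 4))) := by
      rw [bTokens.eq_def]; rfl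
    rw [hb]
    cases hf : findSub2 '*' '/' rest <;>
      rw [hf] at hr <;>
      by_cases hcur : cur = [] <;>
      simp [bMerge, bTokens, segs', hr, hcur, List.take_succ_cons, List.drop_succ_cons]
  | case4 cur segs rest segs' r ih =>
    rw [ih]
    have hr : r = (['/', '/'] ++ (aLineLoop rest []).1, (aLineLoop rest []).2) := by
      show aLineLoop rest ['/', '/'] = _
      simpa using aLineLoop_append rest ['/', '/'] []
    rw [aLineLoop_eq rest] at hr
    have hb : bTokens ('/' :: '/' :: rest) = (match rest.findIdx? (· = '\n') with
      | none => [('/' :: '/' :: rest, true)]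
      | some e => (('/' :: '/' :: rest).take (e + 2), true) :: bTokens (('/' :: '/' :: rest).drop (e + 2))) := by
      rw [bTokens.eq_def]; rfl
    rw [hb]
    cases hf : rest.findIdx? (· = '\n') <;>
      rw [hf] at hr <;>
      by_cases hcur : cur = [] <;>
      simp [bMerge, bTokens, segs', hr, hcur, List.take_succ_cons, List.drop_succ_cons]
  | case5 cur segs rest r ih =>
    rw [ih]
    have hr : r = (cur ++ ['"'] ++ (aStrLoop rest []).1, (aStrLoop rest []).2) := by
      show aStrLoop rest (cur ++ ['"']) = _
      simpa using aStrLoop_append rest (cur ++ ['"']) []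
    rw [aStrLoop_eq rest] at hr
    have hb : bTokens ('"' :: rest) =
        (('"' :: rest).take (bStrEnd rest + 1), false) :: bTokens (('"' :: rest).drop (bStrEnd rest + 1)) := by
      rw [bTokens.eq_def]; rfl
    rw [hb]
    simp [bMerge, hr, List.take_succ_cons, List.drop_succ_cons]
  | case6 cur segs c rest h1 h2 h3 ih =>
    rw [ih]
    rw [bTokens_cons_code c rest h1 h2 h3]
    cases hf : rest.findIdx? (fun d => d = '/' ∨ d = '"') with
    | none =>
      rw [bMerge_bTokens_none rest (cur ++ [c]) hf]
      simp [bMerge]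
    | some j =>
      rw [bMerge_bTokens_some rest (cur ++ [c]) j hf]
      simp [bMerge, List.take_succ_cons, List.drop_succ_cons]

-- ===== VERDICT (by name: the statement is the Claim_ definition above) =====
theorem split_code_comments_py_spec : Claim_equal_split_code_comments_py := by
  intro text _
  unfold Spec_split_code_comments_py split_code_comments_py split_code_comments_py_alt
  simpa using aMain_eq text.toList [] []
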